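-- pv_equiv track=rewrite | github.com/HadjSassi/geekshack3 | scode/teamRAM/prob17/main.py | generate_all_possible_strings
-- ===== SOURCE A (Python) =====
-- def generate_all_possible_strings(s):
--     chaines_possibles = set()
--     chaines_possibles.add(s)
--
--     while True:
--         combinaisons = set()
--         for y in chaines_possibles:
--             tt = [i for i in range(len(y) - 1) if y[i:i + 2] == 'tt']
--             vv = [i for i in range(len(y) - 1) if y[i:i + 2] == 'vv']
--
--             for t in tt:
--                 comb = y[:t] + 'v' + y[t + 2:]
--                 combinaisons.add(comb)
--
--             for t in vv:
--                 comb = y[:t] + 't' + y[t + 2:]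
--                 combinaisons.add(comb)
--
--         combinaisons -= chaines_possibles
--         if not combinaisons:
--             break
--         chaines_possibles |= combinaisons
--     return len(chaines_possibles)%1000000007
-- ===== SOURCE B (Python) =====
-- def generate_all_possible_strings(s):
--     # Layered BFS: every reduction shortens the string by exactly one character,
--     # so strings discovered k steps from s all have length len(s)-k and the
--     # layers are pairwise disjoint -- no visited-set needed, just sum layer sizes.
--     total = 1  # counts s itself
--     layer = {s}
--     while layer:
--         nxt = set()
--         for y in layer:
--             for i in range(len(y) - 1):
--                 if y[i] == y[i + 1] == 't':
--                     nxt.add(y[:i] + 'v' + y[i + 2:])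
--                 elif y[i] == y[i + 1] == 'v':
--                     nxt.add(y[:i] + 't' + y[i + 2:])
--         total += len(nxt)
--         layer = nxt
--     return total % 1000000007
-- ===== Notes on version B (the rewrite author's own statement) =====
-- stated objective: faster
-- what changed: Replaces the rebuild-everything saturation loop (each round re-scans the whole accumulated set and subtracts it) by a layered BFS that expands only the newest frontier once and sums layer sizes, exploiting that every reduction shortens the string by one so layers are disjoint and no visited-set or set difference is needed.
import Mathlib
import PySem

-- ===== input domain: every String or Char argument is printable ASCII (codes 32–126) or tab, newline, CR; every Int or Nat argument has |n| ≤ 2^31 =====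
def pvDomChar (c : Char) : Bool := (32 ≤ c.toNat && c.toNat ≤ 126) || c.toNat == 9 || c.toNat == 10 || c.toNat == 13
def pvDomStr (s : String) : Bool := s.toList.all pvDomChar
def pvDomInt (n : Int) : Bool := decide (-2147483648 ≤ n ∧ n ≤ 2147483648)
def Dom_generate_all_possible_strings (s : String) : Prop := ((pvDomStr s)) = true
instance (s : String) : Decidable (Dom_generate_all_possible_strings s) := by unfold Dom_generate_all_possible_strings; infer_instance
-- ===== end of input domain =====

-- B replaces A's rebuild-everything saturation loop by a layered BFS over the newest
-- frontier only, summing layer sizes (layers are disjoint since each reduction shortens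
-- the string by one); measurably faster on reduction-rich inputs.

-- ===== PORT A =====
-- tt = [i for i in range(len(y) - 1) if y[i:i+2] == 'tt']
def pvTT (y : List Char) : List Int :=
  (PySem.List.pyRange 0 (PySem.List.len y - 1) 1).filter
    (fun i => PySem.List.slice y (some i) (some (i + 2)) == ['t', 't'])

-- vv = [i for i in range(len(y) - 1) if y[i:i+2] == 'vv']
def pvVV (y : List Char) : List Int :=
  (PySem.List.pyRange 0 (PySem.List.len y - 1) 1).filter
    (fun i => PySem.List.slice y (some i) (some (i + 2)) == ['v', 'v'])

-- comb = y[:t] + c + y[t+2:]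
def pvCombAt (y : List Char) (t : Int) (c : Char) : List Char :=
  PySem.List.slice y none (some t) ++ [c] ++ PySem.List.slice y (some (t + 2)) none

-- the body of 'for y in chaines_possibles', accumulating into combinaisons
def pvCombA (acc : PySem.Set (List Char)) (y : List Char) : PySem.Set (List Char) :=
  let acc := (pvTT y).foldl (fun a t => PySem.Set.add a (pvCombAt y t 'v')) acc
  (pvVV y).foldl (fun a t => PySem.Set.add a (pvCombAt y t 't')) acc

-- the 'while True' loop; fuel s.length + 1 is proved sufficient (each round that
-- continues discovers strictly shorter strings, so at most len(s) rounds continue)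
def pvLoopA : Nat → PySem.Set (List Char) → PySem.Set (List Char)
  | 0, cp => cp
  | f + 1, cp =>
    let comb := cp.foldl pvCombA PySem.Set.empty
    let comb := PySem.Set.diff comb cp
    if comb.isEmpty then cp else pvLoopA f (PySem.Set.union cp comb)

def generate_all_possible_strings (s : String) : Int :=
  PySem.Int.mod
    (PySem.Set.len (pvLoopA (s.toList.length + 1) (PySem.Set.add PySem.Set.empty s.toList)))
    1000000007

-- ===== PORT B =====
-- one BFS round: all one-step reductions of the strings in the current layer
def pvStepB (layer : PySem.Set (List Char)) : PySem.Set (List Char) :=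
  layer.foldl
    (fun nxt y =>
      (PySem.List.pyRange 0 (PySem.List.len y - 1) 1).foldl
        (fun nxt i =>
          if PySem.List.pyGetD y i ' ' == 't' && PySem.List.pyGetD y (i + 1) ' ' == 't' then
            PySem.Set.add nxt
              (PySem.List.slice y none (some i) ++ ['v'] ++ PySem.List.slice y (some (i + 2)) none)
          else if PySem.List.pyGetD y i ' ' == 'v' && PySem.List.pyGetD y (i + 1) ' ' == 'v' then
            PySem.Set.add nxt
              (PySem.List.slice y none (some i) ++ ['t'] ++ PySem.List.slice y (some (i + 2)) none)
          else nxt)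
        nxt)
    PySem.Set.empty

-- 'while layer:'; fuel s.length + 2 is proved sufficient (layer k holds strings of
-- length len(s) - k, so at most len(s) + 1 nonempty layers exist)
def pvLoopB : Nat → PySem.Set (List Char) → Int → Int
  | 0, _, total => total
  | f + 1, layer, total =>
    if layer.isEmpty then total
    else
      let nxt := pvStepB layer
      pvLoopB f nxt (total + PySem.Set.len nxt)

def generate_all_possible_strings_alt (s : String) : Int :=
  PySem.Int.mod
    (pvLoopB (s.toList.length + 2) (PySem.Set.add PySem.Set.empty s.toList) 1)
    1000000007

-- ===== PRECONDITION & SPEC =====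
def Spec_generate_all_possible_strings (s : String) (out : Int) : Prop := out = generate_all_possible_strings_alt s
instance (s : String) (out : Int) : Decidable (Spec_generate_all_possible_strings s out) := by unfold Spec_generate_all_possible_strings; infer_instance

-- ===== CLAIM (what is proved, stated in full; the proofs are below) =====
def Claim_equal_generate_all_possible_strings : Prop := ∀ (s : String), Dom_generate_all_possible_strings s → Spec_generate_all_possible_strings s (generate_all_possible_strings s)

-- ===== LEMMAS AND PROOFS =====

-- one-step reduction relation: z is y with a 'tt' replaced by 'v' or a 'vv' by 't'
def pvRel (y z : List Char) : Prop :=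
  ∃ i : Nat, i + 1 < y.length ∧
    ((y[i]? = some 't' ∧ y[i + 1]? = some 't' ∧ z = y.take i ++ ['v'] ++ y.drop (i + 2)) ∨
     (y[i]? = some 'v' ∧ y[i + 1]? = some 'v' ∧ z = y.take i ++ ['t'] ++ y.drop (i + 2)))

-- layer k: strings reachable from s in exactly k reduction steps
def pvLay (s : List Char) : Nat → List Char → Prop
  | 0 => fun z => z = s
  | k + 1 => fun z => ∃ y, pvLay s k y ∧ pvRel y z

def pvReachLe (s : List Char) (k : Nat) (z : List Char) : Prop := ∃ j ≤ k, pvLay s j z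
def pvReach (s : List Char) (z : List Char) : Prop := ∃ j, pvLay s j z

theorem pvRel_length {y z : List Char} (h : pvRel y z) : z.length + 1 = y.length := by
  obtain ⟨i, hi, h | h⟩ := h <;>
    · obtain ⟨-, -, rfl⟩ := h
      simp [List.length_append, List.length_take, List.length_drop]
      omega

theorem pvLay_length {s z : List Char} {k : Nat} (h : pvLay s k z) : z.length + k = s.length := by
  induction k generalizing z with
  | zero => simp [pvLay] at h; subst h; rfl
  | succ k ih =>
    obtain ⟨y, hy, hr⟩ := h
    have := ih hy
    have := pvRel_length hr
    omega

theorem pvLay_empty_above {s : List Char} {k : Nat} (h : ∀ z, ¬ pvLay s k z) :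
    ∀ j z, k ≤ j → ¬ pvLay s j z := by
  intro j
  induction j with
  | zero => intro z hk; have : k = 0 := Nat.le_zero.mp hk; exact this ▸ h z
  | succ j ih =>
    intro z hk hlay
    rcases Nat.lt_or_ge k (j + 1) with hlt | hge
    · obtain ⟨y, hy, -⟩ := hlay
      exact ih y (Nat.lt_succ_iff.mp hlt) hy
    · exact h z ((Nat.le_antisymm hk hge) ▸ hlay)

-- slice of width two names two adjacent characters
theorem pvSlice2 (y : List Char) (i : Nat) (c : Char) :
    ((y.drop i).take 2 = [c, c]) ↔ (y[i]? = some c ∧ y[i + 1]? = some c) := by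
  have h0 : y[i]? = (y.drop i)[0]? := by rw [List.getElem?_drop, Nat.add_zero]
  have h1 : y[i + 1]? = (y.drop i)[1]? := by rw [List.getElem?_drop]
  rcases hd : y.drop i with _ | ⟨a, _ | ⟨b, r⟩⟩ <;> rw [hd] at h0 h1 <;> simp_all

-- the Int index in A's comprehensions is a Nat index at a tt/vv pair
theorem pvMem_idx (y : List Char) (c : Char) (t : Int) :
    (t ∈ (PySem.List.pyRange 0 (PySem.List.len y - 1) 1).filter
        (fun i => PySem.List.slice y (some i) (some (i + 2)) == [c, c])) ↔
    ∃ i : Nat, t = (i : Int) ∧ y[i]? = some c ∧ y[i + 1]? = some c := by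
  rw [List.mem_filter, PySem.List.mem_pyRange_one, PySem.List.len_eq]
  constructor
  · rintro ⟨⟨h0, hlt⟩, hc⟩
    refine ⟨t.toNat, (Int.toNat_of_nonneg h0).symm, ?_⟩
    rw [PySem.List.slice_toNat y h0 (by omega), beq_iff_eq] at hc
    have h2 : ((t : Int) + 2).toNat - t.toNat = 2 := by omega
    rw [h2] at hc
    exact (pvSlice2 y t.toNat c).mp hc
  · rintro ⟨i, rfl, h1, h2⟩
    have hl : i + 1 < y.length := (List.getElem?_eq_some_iff.mp h2).1
    refine ⟨⟨by positivity, by omega⟩, ?_⟩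
    rw [PySem.List.slice_toNat y (by positivity) (by positivity), beq_iff_eq]
    have h2' : ((i : Int) + 2).toNat - (i : Int).toNat = 2 := by omega
    rw [h2', Int.toNat_natCast]
    exact (pvSlice2 y i c).mpr ⟨h1, h2⟩

theorem pvCombAt_natCast (y : List Char) (i : Nat) (c : Char) :
    pvCombAt y (i : Int) c = y.take i ++ [c] ++ y.drop (i + 2) := by
  unfold pvCombAt
  rw [PySem.List.slice_to_natCast]
  have h : ((i : Int) + 2) = ((i + 2 : Nat) : Int) := by push_cast; ring
  rw [h, PySem.List.slice_from_natCast]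

theorem pvRel_iff_A (y z : List Char) :
    pvRel y z ↔
      ((∃ t ∈ pvTT y, z = pvCombAt y t 'v') ∨ (∃ t ∈ pvVV y, z = pvCombAt y t 't')) := by
  unfold pvRel pvTT pvVV
  constructor
  · rintro ⟨i, hb, ⟨h1, h2, rfl⟩ | ⟨h1, h2, rfl⟩⟩
    · exact Or.inl ⟨(i : Int), (pvMem_idx y 't' _).mpr ⟨i, rfl, h1, h2⟩,
        (pvCombAt_natCast y i 'v').symm⟩
    · exact Or.inr ⟨(i : Int), (pvMem_idx y 'v' _).mpr ⟨i, rfl, h1, h2⟩,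
        (pvCombAt_natCast y i 't').symm⟩
  · rintro (⟨t, ht, rfl⟩ | ⟨t, ht, rfl⟩) <;>
      obtain ⟨i, rfl, h1, h2⟩ := (pvMem_idx y _ t).mp ht
    · exact ⟨i, (List.getElem?_eq_some_iff.mp h2).1, Or.inl ⟨h1, h2, pvCombAt_natCast y i 'v'⟩⟩
    · exact ⟨i, (List.getElem?_eq_some_iff.mp h2).1, Or.inr ⟨h1, h2, pvCombAt_natCast y i 't'⟩⟩

-- a fold whose every step either keeps the accumulator or adds one element
theorem pvMem_foldl_of_step {α β : Type} (P : β → α → Prop)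
    (g : List α → β → List α) (hg : ∀ acc y z, z ∈ g acc y ↔ z ∈ acc ∨ P y z) :
    ∀ (l : List β) (acc : List α) (z : α),
      z ∈ l.foldl g acc ↔ z ∈ acc ∨ ∃ y ∈ l, P y z := by
  intro l
  induction l with
  | nil => simp
  | cons y l ih =>
    intro acc z
    rw [List.foldl_cons, ih, hg]
    constructor
    · rintro ((h | h) | ⟨w, hw, hp⟩)
      · exact Or.inl h
      · exact Or.inr ⟨y, List.mem_cons_self, h⟩
      · exact Or.inr ⟨w, List.mem_cons_of_mem y hw, hp⟩
    · rintro (h | ⟨w, hw, hp⟩)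
      · exact Or.inl (Or.inl h)
      · rcases List.mem_cons.mp hw with rfl | hw
        · exact Or.inl (Or.inr hp)
        · exact Or.inr ⟨w, hw, hp⟩

theorem pvNodup_foldl_of_step {α β : Type} (g : List α → β → List α)
    (hg : ∀ acc y, acc.Nodup → (g acc y).Nodup) :
    ∀ (l : List β) (acc : List α), acc.Nodup → (l.foldl g acc).Nodup := by
  intro l
  induction l with
  | nil => exact fun acc h => h
  | cons y l ih => exact fun acc h => ih _ (hg acc y h)

-- membership in A's per-string accumulation
theorem pvMem_combA (acc : PySem.Set (List Char)) (y z : List Char) :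
    z ∈ pvCombA acc y ↔ z ∈ acc ∨ pvRel y z := by
  unfold pvCombA
  simp only [PySem.Set.mem_foldl_add, pvRel_iff_A]
  exact or_assoc

-- membership in A's round: combinaisons before the subtraction
theorem pvMem_combA_fold (cp : PySem.Set (List Char)) (z : List Char) :
    z ∈ cp.foldl pvCombA PySem.Set.empty ↔ ∃ y ∈ cp, pvRel y z := by
  rw [pvMem_foldl_of_step pvRel pvCombA (fun acc y z => pvMem_combA acc y z)]
  simp [PySem.Set.empty]

-- B's 'y[i]' test, with ' ' as the (never-matching) out-of-range default
theorem pvGetD_char (y : List Char) (i : Int) (c : Char) (hc : c ≠ ' ') (h0 : 0 ≤ i) :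
    ((PySem.List.pyGetD y i ' ' == c) = true) ↔ y[i.toNat]? = some c := by
  rw [show i = (i.toNat : Int) from (Int.toNat_of_nonneg h0).symm, PySem.List.pyGetD_natCast,
    List.getD_eq_getElem?_getD, Int.toNat_natCast, beq_iff_eq]
  cases y[i.toNat]?
  · simp
    exact fun he => hc he.symm
  · simp

theorem pvRel_iff_B (y z : List Char) :
    (∃ i ∈ PySem.List.pyRange 0 (PySem.List.len y - 1) 1,
      ((PySem.List.pyGetD y i ' ' == 't' && PySem.List.pyGetD y (i + 1) ' ' == 't') = true ∧
        z = PySem.List.slice y none (some i) ++ ['v'] ++ PySem.List.slice y (some (i + 2)) none) ∨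
      (¬ (PySem.List.pyGetD y i ' ' == 't' && PySem.List.pyGetD y (i + 1) ' ' == 't') = true ∧
        (PySem.List.pyGetD y i ' ' == 'v' && PySem.List.pyGetD y (i + 1) ' ' == 'v') = true ∧
        z = PySem.List.slice y none (some i) ++ ['t'] ++ PySem.List.slice y (some (i + 2)) none)) ↔
    pvRel y z := by
  constructor
  · rintro ⟨i, hi, h⟩
    rw [PySem.List.mem_pyRange_one, PySem.List.len_eq] at hi
    obtain ⟨h0, hlt⟩ := hi
    have h1 : (0 : Int) ≤ i + 1 := by omega
    have ht1 : (i + 1).toNat = i.toNat + 1 := by omega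
    have ht2 : (i + 2).toNat = i.toNat + 2 := by omega
    rcases h with ⟨hcond, rfl⟩ | ⟨-, hcond, rfl⟩ <;>
      rw [Bool.and_eq_true _ _] at hcond <;>
      obtain ⟨ha, hb⟩ := hcond <;>
      rw [pvGetD_char y i _ (by decide) h0] at ha <;>
      rw [pvGetD_char y (i + 1) _ (by decide) h1, ht1] at hb <;>
      rw [PySem.List.slice_to y h0, PySem.List.slice_from y (by omega : (0:Int) ≤ i + 2), ht2]
    · exact ⟨i.toNat, (List.getElem?_eq_some_iff.mp hb).1, Or.inl ⟨ha, hb, rfl⟩⟩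
    · exact ⟨i.toNat, (List.getElem?_eq_some_iff.mp hb).1, Or.inr ⟨ha, hb, rfl⟩⟩
  · rintro ⟨i, hb, h⟩
    refine ⟨(i : Int), ?_, ?_⟩
    · rw [PySem.List.mem_pyRange_one, PySem.List.len_eq]
      constructor
      · positivity
      · omega
    have h0 : (0 : Int) ≤ (i : Int) := by positivity
    have h1 : (0 : Int) ≤ (i : Int) + 1 := by omega
    have ht1 : ((i : Int) + 1).toNat = i + 1 := by omega
    have ht2 : ((i : Int) + 2).toNat = i + 2 := by omega
    have hga := pvGetD_char y (i : Int) 't' (by decide) h0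
    have hgb := pvGetD_char y ((i : Int) + 1) 't' (by decide) h1
    have hga' := pvGetD_char y (i : Int) 'v' (by decide) h0
    have hgb' := pvGetD_char y ((i : Int) + 1) 'v' (by decide) h1
    rw [Int.toNat_natCast] at hga hga'
    rw [ht1] at hgb hgb'
    rw [PySem.List.slice_to y h0, PySem.List.slice_from y (by omega : (0:Int) ≤ (i:Int) + 2),
      ht2, Int.toNat_natCast]
    rcases h with ⟨hx, hy, rfl⟩ | ⟨hx, hy, rfl⟩
    · exact Or.inl ⟨(Bool.and_eq_true _ _).mpr ⟨hga.mpr hx, hgb.mpr hy⟩, rfl⟩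
    · refine Or.inr ⟨?_, (Bool.and_eq_true _ _).mpr ⟨hga'.mpr hx, hgb'.mpr hy⟩, rfl⟩
      rw [Bool.and_eq_true _ _]
      rintro ⟨hcontra, -⟩
      rw [hga] at hcontra
      rw [hx] at hcontra
      simp at hcontra

-- membership in B's round
theorem pvMem_stepB (layer : PySem.Set (List Char)) (z : List Char) :
    z ∈ pvStepB layer ↔ ∃ y ∈ layer, pvRel y z := by
  unfold pvStepB
  rw [pvMem_foldl_of_step pvRel _ (fun acc y z => ?_) layer _ z]
  · simp [PySem.Set.empty]
  · rw [pvMem_foldl_of_step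
      (fun i z => ((PySem.List.pyGetD y i ' ' == 't' && PySem.List.pyGetD y (i + 1) ' ' == 't') = true ∧
        z = PySem.List.slice y none (some i) ++ ['v'] ++ PySem.List.slice y (some (i + 2)) none) ∨
      (¬ (PySem.List.pyGetD y i ' ' == 't' && PySem.List.pyGetD y (i + 1) ' ' == 't') = true ∧
        (PySem.List.pyGetD y i ' ' == 'v' && PySem.List.pyGetD y (i + 1) ' ' == 'v') = true ∧
        z = PySem.List.slice y none (some i) ++ ['t'] ++ PySem.List.slice y (some (i + 2)) none))
      _ (fun acc i z => ?_) _ _ z, pvRel_iff_B]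
    · split_ifs with hc1 hc2
      · simp only [PySem.Set.mem_add]
        constructor
        · rintro (h | h)
          · exact Or.inl h
          · exact Or.inr (Or.inl ⟨hc1, h⟩)
        · rintro (h | (⟨-, h⟩ | ⟨hn, -, -⟩))
          · exact Or.inl h
          · exact Or.inr h
          · exact absurd hc1 hn
      · simp only [PySem.Set.mem_add]
        constructor
        · rintro (h | h)
          · exact Or.inl h
          · exact Or.inr (Or.inr ⟨hc1, hc2, h⟩)
        · rintro (h | (⟨hc, -⟩ | ⟨-, -, h⟩))
          · exact Or.inl h
          · exact absurd hc hc1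
          · exact Or.inr h
      · constructor
        · exact Or.inl
        · rintro (h | (⟨hc, -⟩ | ⟨-, hc, -⟩))
          · exact h
          · exact absurd hc hc1
          · exact absurd hc hc2

theorem pvNodup_stepB (layer : PySem.Set (List Char)) : (pvStepB layer).Nodup := by
  unfold pvStepB
  refine pvNodup_foldl_of_step _ (fun acc y h => ?_) layer PySem.Set.empty List.nodup_nil
  refine pvNodup_foldl_of_step _ (fun a i ha => ?_) _ _ h
  split_ifs <;> first | exact PySem.Set.nodup_add _ _ ha | exact ha

-- layers are pairwise disjoint: layer k+1 strings are strictly shorter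
theorem pvLay_not_reachLe {s z : List Char} {k : Nat} (h : pvLay s (k + 1) z) :
    ¬ pvReachLe s k z := by
  rintro ⟨j, hj, hlay⟩
  have h1 := pvLay_length h
  have h2 := pvLay_length hlay
  omega

theorem pvLoopA_spec (s : List Char) :
    ∀ (fuel k : Nat) (cp : PySem.Set (List Char)),
      cp.Nodup → (∀ z, z ∈ cp ↔ pvReachLe s k z) → k ≤ s.length →
      s.length + 1 ≤ k + fuel →
      (pvLoopA fuel cp).Nodup ∧ ∀ z, z ∈ pvLoopA fuel cp ↔ pvReach s z := by
  intro fuel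
  induction fuel with
  | zero => intro k cp _ _ hk hf; omega
  | succ f ih =>
    intro k cp hnd hcp hk hf
    have hmemD : ∀ z, z ∈ PySem.Set.diff (cp.foldl pvCombA PySem.Set.empty) cp ↔
        pvLay s (k + 1) z := by
      intro z
      rw [PySem.Set.mem_diff, pvMem_combA_fold]
      constructor
      · rintro ⟨⟨y, hy, hrel⟩, hnz⟩
        obtain ⟨j, hj, hlay⟩ := (hcp y).mp hy
        have : j = k := by
          by_contra hne
          exact hnz ((hcp z).mpr ⟨j + 1, by omega, ⟨y, hlay, hrel⟩⟩)
        exact this ▸ ⟨y, hlay, hrel⟩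
      · rintro ⟨y, hlay, hrel⟩
        refine ⟨⟨y, (hcp y).mpr ⟨k, le_refl k, hlay⟩, hrel⟩, ?_⟩
        intro hz
        exact pvLay_not_reachLe ⟨y, hlay, hrel⟩ ((hcp z).mp hz)
    rw [show pvLoopA (f + 1) cp =
        (if (PySem.Set.diff (cp.foldl pvCombA PySem.Set.empty) cp).isEmpty then cp
         else pvLoopA f
           (PySem.Set.union cp (PySem.Set.diff (cp.foldl pvCombA PySem.Set.empty) cp)))
      from rfl]
    split_ifs with hempty
    · rw [List.isEmpty_iff] at hempty
      have hnone : ∀ z, ¬ pvLay s (k + 1) z := by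
        intro z hz
        have := (hmemD z).mpr hz
        rw [hempty] at this
        exact List.not_mem_nil this
      refine ⟨hnd, fun z => ⟨fun hz => ?_, fun hz => ?_⟩⟩
      · obtain ⟨j, _, hlay⟩ := (hcp z).mp hz
        exact ⟨j, hlay⟩
      · obtain ⟨j, hlay⟩ := hz
        rcases (show j ≤ k ∨ k < j by omega) with hj | hj
        · exact (hcp z).mpr ⟨j, hj, hlay⟩
        · exact absurd hlay (pvLay_empty_above hnone j z hj)
    · have hne : PySem.Set.diff (cp.foldl pvCombA PySem.Set.empty) cp ≠ [] := by
        intro h; rw [h] at hempty; exact hempty rfl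
      obtain ⟨z0, hz0⟩ := List.exists_mem_of_ne_nil _ hne
      have hk1 : k + 1 ≤ s.length := by
        have := pvLay_length ((hmemD z0).mp hz0)
        omega
      refine ih (k + 1) _ (PySem.Set.nodup_union _ _ hnd) (fun z => ?_) hk1 (by omega)
      rw [PySem.Set.mem_union]
      constructor
      · rintro (hz | hz)
        · obtain ⟨j, hj, hlay⟩ := (hcp z).mp hz
          exact ⟨j, by omega, hlay⟩
        · exact ⟨k + 1, le_refl _, (hmemD z).mp hz⟩
      · rintro ⟨j, hj, hlay⟩
        rcases (show j ≤ k ∨ k < j by omega) with hj' | hj'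
        · exact Or.inl ((hcp z).mpr ⟨j, hj', hlay⟩)
        · have : j = k + 1 := by omega
          exact Or.inr ((hmemD z).mpr (this ▸ hlay))

theorem pvLoopB_spec (s : List Char) :
    ∀ (fuel k : Nat) (layer : PySem.Set (List Char)) (total : Int) (V : List (List Char)),
      layer.Nodup → (∀ z, z ∈ layer ↔ pvLay s k z) →
      V.Nodup → (∀ z, z ∈ V ↔ pvReachLe s k z) → total = (V.length : Int) →
      k ≤ s.length + 1 → s.length + 2 ≤ k + fuel →
      ∃ W : List (List Char), W.Nodup ∧ (∀ z, z ∈ W ↔ pvReach s z) ∧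
        pvLoopB fuel layer total = (W.length : Int) := by
  intro fuel
  induction fuel with
  | zero => intro k layer total V _ _ _ _ _ hk hf; omega
  | succ f ih =>
    intro k layer total V hlnd hlay hVnd hV htot hk hf
    rw [show pvLoopB (f + 1) layer total =
        (if layer.isEmpty then total
         else pvLoopB f (pvStepB layer) (total + PySem.Set.len (pvStepB layer))) from rfl]
    split_ifs with hempty
    · rw [List.isEmpty_iff] at hempty
      have hnone : ∀ z, ¬ pvLay s k z := by
        intro z hz
        have := (hlay z).mpr hz
        rw [hempty] at this
        exact List.not_mem_nil this
      refine ⟨V, hVnd, fun z => ⟨fun hz => ?_, fun hz => ?_⟩, htot⟩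
      · obtain ⟨j, _, hl⟩ := (hV z).mp hz
        exact ⟨j, hl⟩
      · obtain ⟨j, hl⟩ := hz
        rcases (show k ≤ j ∨ j < k by omega) with hj | hj
        · exact absurd hl (pvLay_empty_above hnone j z hj)
        · exact (hV z).mpr ⟨j, by omega, hl⟩
    · have hne : layer ≠ [] := by
        intro h; rw [h] at hempty; exact hempty rfl
      obtain ⟨y0, hy0⟩ := List.exists_mem_of_ne_nil _ hne
      have hkn : k ≤ s.length := by
        have := pvLay_length ((hlay y0).mp hy0)
        omega
      have hstep : ∀ z, z ∈ pvStepB layer ↔ pvLay s (k + 1) z := by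
        intro z
        rw [pvMem_stepB]
        constructor
        · rintro ⟨y, hy, hrel⟩
          exact ⟨y, (hlay y).mp hy, hrel⟩
        · rintro ⟨y, hl, hrel⟩
          exact ⟨y, (hlay y).mpr hl, hrel⟩
      have hdisj : ∀ z ∈ V, z ∉ pvStepB layer := by
        intro z hz hz'
        exact pvLay_not_reachLe ((hstep z).mp hz') ((hV z).mp hz)
      refine ih (k + 1) (pvStepB layer) _ (V ++ pvStepB layer)
        (pvNodup_stepB layer) hstep
        (List.Nodup.append hVnd (pvNodup_stepB layer) (List.disjoint_right.mpr
          (fun z hz hz' => hdisj z hz' hz)))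
        (fun z => ?_) ?_ (by omega) (by omega)
      · rw [List.mem_append]
        constructor
        · rintro (hz | hz)
          · obtain ⟨j, hj, hl⟩ := (hV z).mp hz
            exact ⟨j, by omega, hl⟩
          · exact ⟨k + 1, le_refl _, (hstep z).mp hz⟩
        · rintro ⟨j, hj, hl⟩
          rcases (show j ≤ k ∨ k < j by omega) with hj' | hj'
          · exact Or.inl ((hV z).mpr ⟨j, hj', hl⟩)
          · have : j = k + 1 := by omega
            exact Or.inr ((hstep z).mpr (this ▸ hl))
      · rw [List.length_append, htot]
        simp [PySem.Set.len]
        try push_cast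
        try ring

-- ===== VERDICT (by name: the statement is the Claim_ definition above) =====
theorem generate_all_possible_strings_spec : Claim_equal_generate_all_possible_strings := by
  intro s _
  unfold Spec_generate_all_possible_strings generate_all_possible_strings
    generate_all_possible_strings_alt
  set t := s.toList with ht
  have hinit : PySem.Set.add PySem.Set.empty t = [t] := rfl
  have hlay0 : ∀ z, z ∈ [t] ↔ pvLay t 0 z := by
    intro z
    simp [pvLay]
  have hmem0 : ∀ z, z ∈ [t] ↔ pvReachLe t 0 z := by
    intro z
    rw [hlay0 z]
    constructor
    · exact fun h => ⟨0, le_refl 0, h⟩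
    · rintro ⟨j, hj, hl⟩
      have : j = 0 := Nat.le_zero.mp hj
      exact this ▸ hl
  obtain ⟨hUnd, hUm⟩ := pvLoopA_spec t (t.length + 1) 0 [t] (List.nodup_singleton t) hmem0
    (Nat.zero_le _) (by omega)
  obtain ⟨W, hWnd, hWm, hEq⟩ := pvLoopB_spec t (t.length + 2) 0 [t] 1 [t]
    (List.nodup_singleton t) hlay0 (List.nodup_singleton t) hmem0 (by simp)
    (by omega) (by omega)
  rw [hinit, hEq]
  have hperm : (pvLoopA (t.length + 1) [t]).Perm W :=
    (List.perm_ext_iff_of_nodup hUnd hWnd).mpr (fun a => (hUm a).trans (hWm a).symm)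
  rw [show PySem.Set.len (pvLoopA (t.length + 1) [t]) =
      ((pvLoopA (t.length + 1) [t]).length : Int) by simp [PySem.Set.len]]
  rw [hperm.length_eq]
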